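-- pv_equiv track=rewrite | github.com/aishaKifah/TSP | main copy.py | findDublicated_indexes
-- ===== SOURCE A (Python) =====
-- def findDublicated_indexes(List):
--     '''''
--     in this menthod we take the dublicted indexes after cross over
--     '''''
--     d1 = {item: list(List).count(item) for item in List}  # item and their counts
--     elems = list(filter(lambda x: d1[x] > 1, d1))  # get duplicate elements
--     d2 = dict(zip(range(0, len(List)), List))  # each item and their indices
--     duplicated_indexes = []
--     res = {item: list(filter(lambda x: d2[x] == item, d2)) for item in elems}
--     for key in res:
--         duplicated_indexes.append(res.get(key)[0])
--     return duplicated_indexes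
-- ===== SOURCE B (Python) =====
-- def findDublicated_indexes(List):
--     groups = {}
--     for i, x in enumerate(List):
--         groups[x] = groups.get(x, []) + [i]
--     return [idxs[0] for idxs in groups.values() if len(idxs) > 1]
-- ===== Notes on version B (the rewrite author's own statement) =====
-- stated objective: faster
-- what changed: One grouping pass over enumerate(List) building element->index-list, then take the head of each group with more than one index, instead of A's three dict comprehensions with count() and a nested filter scan per element.
import Mathlib
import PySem

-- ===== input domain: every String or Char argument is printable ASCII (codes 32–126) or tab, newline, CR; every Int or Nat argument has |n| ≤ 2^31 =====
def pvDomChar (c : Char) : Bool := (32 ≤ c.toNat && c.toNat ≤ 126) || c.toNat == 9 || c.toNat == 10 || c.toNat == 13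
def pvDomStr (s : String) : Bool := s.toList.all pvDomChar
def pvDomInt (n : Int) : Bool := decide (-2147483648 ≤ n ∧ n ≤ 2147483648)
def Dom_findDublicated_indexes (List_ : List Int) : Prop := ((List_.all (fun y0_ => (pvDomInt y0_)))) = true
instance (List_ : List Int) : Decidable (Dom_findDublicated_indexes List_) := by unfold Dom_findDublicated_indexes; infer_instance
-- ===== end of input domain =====

-- B replaces A's three dict comprehensions (a count() scan per element plus a full-index filter
-- scan per duplicate element) by one grouping pass over enumerate(List); objective: faster.

-- ===== PORT A =====
def findDublicated_indexes (List_ : List Int) : List Int :=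
  -- d1 = {item: list(List).count(item) for item in List}
  let d1 : PySem.Dict Int Int :=
    List_.foldl (fun d item => d.insert item (PySem.List.count List_ item)) PySem.Dict.empty
  -- elems = list(filter(lambda x: d1[x] > 1, d1))  (d1[x]: x is a key of d1, so getD is exact)
  let elems : List Int := d1.keys.filter (fun x => decide (d1.getD x 0 > 1))
  -- d2 = dict(zip(range(0, len(List)), List))
  let d2 : PySem.Dict Int Int :=
    PySem.Dict.ofList ((PySem.List.pyRange 0 (List_.length : Int) 1).zip List_)
  -- res = {item: list(filter(lambda x: d2[x] == item, d2)) for item in elems}  (d2[x]: x ∈ d2)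
  let res : PySem.Dict Int (List Int) :=
    elems.foldl (fun d item => d.insert item (d2.keys.filter (fun x => d2.getD x 0 == item)))
      PySem.Dict.empty
  -- for key in res: duplicated_indexes.append(res.get(key)[0])
  -- res.get(key)[0]: exact, the index list of a key of res is nonempty (its element occurs in List)
  res.keys.foldl (fun acc key => acc ++ [(res.getD key []).headD 0]) []

-- ===== PORT B =====
def findDublicated_indexes_alt (List_ : List Int) : List Int :=
  -- groups[x] = groups.get(x, []) + [i] for i, x in enumerate(List)
  let groups : PySem.Dict Int (List Int) :=
    (PySem.List.enumerate List_).foldl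
      (fun d p => d.modify p.2 [] (fun idxs => idxs ++ [p.1])) PySem.Dict.empty
  -- [idxs[0] for idxs in groups.values() if len(idxs) > 1]  (idxs[0]: exact, idxs is nonempty)
  (groups.values.filter (fun idxs => decide (idxs.length > 1))).map (fun idxs => idxs.headD 0)

-- ===== PRECONDITION & SPEC =====
def Spec_findDublicated_indexes (List_ : List Int) (out : List Int) : Prop := out = findDublicated_indexes_alt List_
instance (List_ : List Int) (out : List Int) : Decidable (Spec_findDublicated_indexes List_ out) := by unfold Spec_findDublicated_indexes; infer_instance

-- ===== CLAIM (what is proved, stated in full; the proofs are below) =====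
def Claim_equal_findDublicated_indexes : Prop := ∀ (List_ : List Int), Dom_findDublicated_indexes List_ → Spec_findDublicated_indexes List_ (findDublicated_indexes List_)

-- ===== LEMMAS AND PROOFS =====

theorem pv_enum_eq_zip {α : Type} (l : List α) (s : Int) :
    PySem.List.enumerate l s = (PySem.List.pyRange s (s + l.length) 1).zip l := by
  induction l generalizing s with
  | nil => simp [PySem.List.enumerate]
  | cons x t ih =>
    have h2 : s + ((x::t).length : Int) = (s+1) + (t.length : Int) := by push_cast [List.length_cons]; omega
    rw [h2, PySem.List.pyRange_one_cons (by omega)]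
    simp only [PySem.List.enumerate, List.zip_cons_cons]
    rw [ih (s+1)]

theorem pv_map_snd_enum {α : Type} (l : List α) (s : Int) :
    (PySem.List.enumerate l s).map (fun p => p.2) = l := by
  induction l generalizing s with
  | nil => simp [PySem.List.enumerate]
  | cons x t ih => simp [PySem.List.enumerate, ih]

theorem pv_mem_enum_fst {α : Type} (l : List α) (s : Int) {p : Int × α}
    (h : p ∈ PySem.List.enumerate l s) : s ≤ p.1 := by
  induction l generalizing s with
  | nil => simp [PySem.List.enumerate] at h
  | cons x t ih =>
    simp only [PySem.List.enumerate, List.mem_cons] at h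
    rcases h with h | h
    · simp [h]
    · have := ih (s+1) h; omega

theorem pv_nodup_fst_enum {α : Type} (l : List α) (s : Int) :
    ((PySem.List.enumerate l s).map (fun p => p.1)).Nodup := by
  induction l generalizing s with
  | nil => simp [PySem.List.enumerate]
  | cons x t ih =>
    simp only [PySem.List.enumerate, List.map_cons, List.nodup_cons]
    refine ⟨?_, ih (s+1)⟩
    intro hmem
    rcases List.mem_map.1 hmem with ⟨p, hp, hps⟩
    have := pv_mem_enum_fst t (s+1) hp
    omega

theorem pv_length_filter_enum {α : Type} [DecidableEq α] (l : List α) (s : Int) (x : α) :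
    ((PySem.List.enumerate l s).filter (fun p => p.2 == x)).length = l.count x := by
  induction l generalizing s with
  | nil => simp [PySem.List.enumerate]
  | cons y t ih =>
    simp only [PySem.List.enumerate, List.filter_cons, List.count_cons]
    by_cases h : y = x <;> simp [h, ih (s+1)]

theorem pv_getD_foldl_insert_const (l : List Int) (c : Int → Int) (d : PySem.Dict Int Int) (x : Int) :
    (l.foldl (fun d item => d.insert item (c item)) d).getD x 0 =
      if x ∈ l then c x else d.getD x 0 := by
  induction l generalizing d with
  | nil => simp
  | cons a t ih =>
    simp only [List.foldl_cons, ih, List.mem_cons]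
    rw [PySem.Dict.getD_insert]
    by_cases ht : x ∈ t <;> by_cases ha : x = a <;> simp [ht, ha]


theorem findDublicated_indexes_spec' (List_ : List Int) :
    findDublicated_indexes List_ = findDublicated_indexes_alt List_ := by
  simp only [findDublicated_indexes, findDublicated_indexes_alt]
  set l := List_ with hl
  set enum := PySem.List.enumerate l 0 with henum
  set idxB : Int → List Int := fun x => (enum.filter (fun p => p.2 == x)).map (fun p => p.1) with hidxB
  -- d1
  set d1 : PySem.Dict Int Int :=
    l.foldl (fun d item => d.insert item (PySem.List.count l item)) PySem.Dict.empty with hd1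
  have keys_d1 : d1.keys = PySem.Set.ofList l := by
    rw [hd1, PySem.Dict.keys_foldl_insert l (fun _ item => ((PySem.List.count l item : Int))),
      PySem.Dict.keys_empty, PySem.Set.ofList_eq_foldl]
    rfl
  have getD_d1 : ∀ x ∈ l, d1.getD x 0 = (l.count x : Int) := by
    intro x hx
    rw [hd1, pv_getD_foldl_insert_const l (fun item => (PySem.List.count l item : Int))]
    simp [hx, PySem.List.count]
  -- elems
  have elems_eq : d1.keys.filter (fun x => decide (d1.getD x 0 > 1)) =
      (PySem.Set.ofList l).filter (fun x => decide ((l.count x : Int) > 1)) := by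
    rw [keys_d1]
    apply List.filter_congr
    intro x hx
    rw [getD_d1 x ((PySem.Set.mem_ofList l x).1 hx)]
  -- d2
  have enum0 : (PySem.List.pyRange 0 (l.length : Int) 1).zip l = enum := by
    rw [henum, pv_enum_eq_zip l 0, zero_add]
  have items_d2 : (PySem.Dict.ofList ((PySem.List.pyRange 0 (l.length : Int) 1).zip l)).items = enum := by
    rw [enum0]
    have := PySem.Dict.items_foldl_insert_fresh enum (fun p => p.1) (fun p => p.2) PySem.Dict.empty
      (by intro a _; exact PySem.Dict.contains_empty _) (pv_nodup_fst_enum l 0)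
    simpa [PySem.Dict.ofList, PySem.Dict.update] using this
  set d2 : PySem.Dict Int Int := PySem.Dict.ofList ((PySem.List.pyRange 0 (l.length : Int) 1).zip l) with hd2
  have keys_d2 : d2.keys = enum.map (fun p => p.1) := by
    simp only [PySem.Dict.keys, items_d2]
  have nodup_d2 : d2.keys.Nodup := keys_d2 ▸ pv_nodup_fst_enum l 0
  have getD_d2 : ∀ p ∈ enum, d2.getD p.1 0 = p.2 := by
    intro p hp
    exact PySem.Dict.getD_of_mem_items d2 (by rw [items_d2]; exact hp) nodup_d2 0
  -- idxA = idxB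
  have idxA_eq : ∀ x : Int, d2.keys.filter (fun i => d2.getD i 0 == x) = idxB x := by
    intro x
    rw [keys_d2, List.filter_map]
    have hfc : enum.filter ((fun i => d2.getD i 0 == x) ∘ (fun p => p.1)) =
        enum.filter (fun p => p.2 == x) :=
      List.filter_congr (fun p hp => by simp only [Function.comp_apply, getD_d2 p hp])
    rw [hfc]
  -- res
  have nodup_elems : ((PySem.Set.ofList l).filter (fun x => decide ((l.count x : Int) > 1))).Nodup :=
    (PySem.Set.nodup_ofList l).filter _
  set elems := (PySem.Set.ofList l).filter (fun x => decide ((l.count x : Int) > 1)) with helems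
  set res : PySem.Dict Int (List Int) :=
    elems.foldl (fun d item => d.insert item (d2.keys.filter (fun x => d2.getD x 0 == item)))
      PySem.Dict.empty with hres
  have items_res : res.items = elems.map (fun x => (x, idxB x)) := by
    rw [hres]
    have := PySem.Dict.items_foldl_insert_fresh elems (fun x => x)
      (fun item => d2.keys.filter (fun x => d2.getD x 0 == item)) PySem.Dict.empty
      (by intro a _; exact PySem.Dict.contains_empty _) (by simpa using nodup_elems)
    simpa [idxA_eq] using this
  have keys_res : res.keys = elems := by
    simp only [PySem.Dict.keys, items_res, List.map_map]
    refine (List.map_congr_left ?_).trans (List.map_id _)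
    intro x _; rfl
  have getD_res : ∀ x ∈ elems, res.getD x [] = idxB x := by
    intro x hx
    exact PySem.Dict.getD_of_mem_items res
      (by rw [items_res]; exact List.mem_map_of_mem hx)
      (by rw [keys_res]; exact nodup_elems) []
  -- A's final loop
  rw [elems_eq]
  rw [PySem.List.foldl_append_singleton_eq_map (fun key => (res.getD key []).headD 0) res.keys []]
  rw [List.nil_append, keys_res,
    List.map_congr_left (fun x hx => by rw [getD_res x hx])]
  -- B side
  set groups : PySem.Dict Int (List Int) :=
    (PySem.List.enumerate l).foldl
      (fun d p => d.modify p.2 [] (fun idxs => idxs ++ [p.1])) PySem.Dict.empty with hgroups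
  have groups_swap : groups =
      (enum.map Prod.swap).foldl (fun d p => d.modify p.1 [] (fun idxs => idxs ++ [p.2]))
        PySem.Dict.empty := by
    rw [List.foldl_map]; rfl
  have getD_groups : ∀ x : Int, groups.getD x [] = idxB x := by
    intro x
    rw [groups_swap, PySem.Dict.getD_foldl_modify_append,
      PySem.Dict.getD_empty, List.nil_append, List.filter_map, List.map_map]
    rfl
  have keys_groups : groups.keys = PySem.Set.ofList l := by
    rw [hgroups]
    rw [PySem.Dict.keys_foldl_modify_key (PySem.List.enumerate l) (fun p => p.2) []
      (fun _ p idxs => idxs ++ [p.1]) PySem.Dict.empty]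
    rw [PySem.Dict.keys_empty]
    have : PySem.List.enumerate l 0 = PySem.List.enumerate l := rfl
    rw [← this, pv_map_snd_enum l 0, PySem.Set.ofList_eq_foldl]
    rfl
  have nodup_groups : groups.keys.Nodup := by
    rw [hgroups]
    exact PySem.Dict.nodup_keys_foldl_modify_key _ _ _ _ _ PySem.Dict.nodup_keys_empty
  have values_groups : groups.values = (PySem.Set.ofList l).map (fun k => idxB k) := by
    rw [PySem.Dict.values_eq_map_keys groups nodup_groups [], keys_groups]
    exact List.map_congr_left (fun x _ => getD_groups x)
  rw [values_groups, List.filter_map, List.map_map]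
  -- both now maps over filters of Set.ofList l
  have pred_eq : ∀ x : Int,
      ((fun idxs => decide (idxs.length > 1)) ∘ fun k => idxB k) x
        = decide ((l.count x : Int) > 1) := by
    intro x
    simp only [Function.comp_apply, hidxB, List.length_map]
    rw [henum, pv_length_filter_enum l 0 x]
    simp
  rw [List.filter_congr (fun x _ => pred_eq x)]
  rfl

-- ===== VERDICT (by name: the statement is the Claim_ definition above) =====
theorem findDublicated_indexes_spec : Claim_equal_findDublicated_indexes := by
  intro List_ _
  exact findDublicated_indexes_spec' List_
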